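-- pv_equiv track=rewrite | github.com/SamuelVanie/IA-algo-demo-theoreme | app/bin/main/refutation.py | clause_map
-- ===== SOURCE A (Python) =====
-- def forward_slice(sentence, index):
--     """
--     Returns forward slice of sentence begining from index.
--     Let us define forward slice as next complete segment in sentence.
--     Examples:
--         Forward Slice from index = 2 of "A(B(!C&D))" is "(B(!C&D))"
--         Forward Slice from index = 3 of "A(B(!C&D))" is "B"
--         Forward Slice from index = 4 of "A(B(!C&D))" is "(!C&D)"
--         Forward Slice from index = 5 of "A(B(!C&D))" is "!C"
--
--     @param sentence (list)
--     : Propositional Sentence or Formula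
--     @param index (int)
--     : Index from which slicing should begin (included)
--     """
--     off_balance = 0
--     i = index
--
--     while i < len(sentence):
--         off_balance += 1 if sentence[i] == "(" else -1 if sentence[i] == ")" else 0
--         if off_balance == 0 and sentence[i] != "!":
--             return sentence[index : (i + 1)], i
--         i += 1
--
-- def clause_map(sentence):
--     """
--     Returns a map where keys are literals in sentence
--     and value is True if they are negated and False otherwise.
--     @param sentence (list)
--     : Propositional Sentence or Formula in CNF
--     : Format : (A|B|...|Z) where literal like A, B, ..., Z can be negated.
--     """
--     m = {}
--     j = 1 if sentence[0] == "(" else 0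
--     L = len(sentence) - 1 if sentence[0] == "(" else len(sentence)
--     while j < L:
--         literal, j = forward_slice(sentence, j)
--         if literal[0] == "!":
--             m[literal[1]] = True
--         else:
--             m[literal[0]] = False
--         # [NOTE] 'j' is incremented by 2 to escape '|' and reach next literal.
--         j += 2
--     return m
-- ===== SOURCE B (Python) =====
-- def clause_map(sentence):
--     """Same mapping, without forward_slice's balance-counter scan-and-slice:
--     strip the surrounding parentheses up front, then walk the inner token
--     list once, one group ('!' + literal, or a lone literal) at a time,
--     stepping over one separator token between groups."""
--     inner = sentence[1:-1] if sentence[0] == "(" else list(sentence)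
--     m = {}
--     k = 0
--     n = len(inner)
--     while k < n:
--         if inner[k] == "!":
--             m[inner[k + 1]] = True
--             k += 3
--         else:
--             m[inner[k]] = False
--             k += 2
--     return m
-- ===== Notes on version B (the rewrite author's own statement) =====
-- stated objective: simpler
-- what changed: B drops forward_slice's balance-counter scan and slice/unpack machinery entirely: it strips the surrounding parentheses once and then walks the inner token list in a single direct-index pass, taking one token (or '!' plus one) per group and stepping over one separator, instead of A's while loop that calls a scanning helper building a slice at every step.
-- outside the precondition, e.g. on clause_map(['(', '!', 'B']): A returns {'B': True}, B raises IndexError; on clause_map(['(', '(', 'A', ')', ')']): A returns {'(': False}, B returns {'(': False, ')': False}; on clause_map(['!', '!', 'A', 'X']): A returns {'!': True}, B returns {'!': True, 'X': False}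
import Mathlib
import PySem

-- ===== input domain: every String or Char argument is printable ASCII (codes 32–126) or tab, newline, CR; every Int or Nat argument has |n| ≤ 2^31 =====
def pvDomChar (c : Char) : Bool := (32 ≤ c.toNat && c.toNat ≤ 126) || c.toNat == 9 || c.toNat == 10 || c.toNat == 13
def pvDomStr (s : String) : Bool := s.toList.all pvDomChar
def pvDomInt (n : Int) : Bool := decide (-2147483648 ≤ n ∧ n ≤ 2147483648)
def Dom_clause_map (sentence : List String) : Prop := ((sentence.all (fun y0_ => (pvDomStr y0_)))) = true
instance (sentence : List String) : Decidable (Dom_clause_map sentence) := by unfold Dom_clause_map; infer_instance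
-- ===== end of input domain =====

-- B replaces A's balance-counter scan-and-slice helper by a single structural recursion
-- over the de-parenthesised token list (objective: simpler); return-value equivalence only.

-- ===== PORT A =====
-- forward_slice's while loop; indices stay nonnegative in every call clause_map makes,
-- so they are Nat here, and sentence[index:(i+1)] with 0 ≤ index ≤ i+1 is exactly
-- (take (i+1)).drop index.  'none' = the Python loop falling through (returning None).
def forwardSliceGo (s : List String) (index i : Nat) (off : Int) : Option (List String × Nat) :=
  if _h : i < s.length then
    let off' := off + (if s.getD i "" = "(" then 1 else if s.getD i "" = ")" then (-1) else 0)
    if off' = 0 ∧ s.getD i "" ≠ "!" then some ((s.take (i + 1)).drop index, i)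
    else forwardSliceGo s index (i + 1) off'
  else none
termination_by s.length - i

def forward_slice (s : List String) (index : Nat) : Option (List String × Nat) :=
  forwardSliceGo s index index 0

-- clause_map's while loop; fuel = sentence.length + 1 is ample since j grows by ≥ 2 per
-- iteration.  On forward_slice = none Python raises (unpacking None): outside Pre_, we stop.
def clauseMapGo (s : List String) (L fuel j : Nat) (m : PySem.Dict String Bool) : PySem.Dict String Bool :=
  match fuel with
  | 0 => m
  | fuel + 1 =>
    if j < L then
      match forward_slice s j with
      | none => m
      | some (literal, i) =>
        let m' := if literal.getD 0 "" = "!" then m.insert (literal.getD 1 "") true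
                  else m.insert (literal.getD 0 "") false
        clauseMapGo s L fuel (i + 2) m'
    else m

def clause_map (sentence : List String) : List (String × Bool) :=
  let j := if sentence.getD 0 "" = "(" then 1 else 0
  let L := if sentence.getD 0 "" = "(" then sentence.length - 1 else sentence.length
  (clauseMapGo sentence L (sentence.length + 1) j PySem.Dict.empty).items

-- ===== PORT B =====
-- Source B's while loop; inner[k+1] out of range (lone trailing '!') is a Python IndexError,
-- outside Pre_, rendered as getD.
def altGo (inner : List String) (k : Nat) (m : PySem.Dict String Bool) : PySem.Dict String Bool :=
  if _h : k < inner.length then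
    if inner.getD k "" = "!" then altGo inner (k + 3) (m.insert (inner.getD (k + 1) "") true)
    else altGo inner (k + 2) (m.insert (inner.getD k "") false)
  else m
termination_by inner.length - k

def clause_map_alt (sentence : List String) : List (String × Bool) :=
  let inner := if sentence.getD 0 "" = "(" then PySem.List.slice sentence (some 1) (some (-1))
               else sentence
  (altGo inner 0 PySem.Dict.empty).items

-- ===== PRECONDITION & SPEC =====
-- the inner token span both programs work on
def pvInner (sentence : List String) : List String :=
  if sentence.getD 0 "" = "(" then (sentence.drop 1).dropLast else sentence

-- Pre_ excludes the empty list (A raises IndexError) and clauses whose inner span contains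
-- a parenthesis token, a trailing "!", or two consecutive "!" tokens: there A's balance
-- scanner raises (unpacking None / IndexError) or returns accidental slice-based values.
def Pre_clause_map (sentence : List String) : Prop :=
  sentence ≠ [] ∧
  ∀ p, p < (pvInner sentence).length →
    (pvInner sentence).getD p "" ≠ "(" ∧ (pvInner sentence).getD p "" ≠ ")" ∧
    ((pvInner sentence).getD p "" = "!" →
      p + 1 < (pvInner sentence).length ∧ (pvInner sentence).getD (p + 1) "" ≠ "!")
instance (sentence : List String) : Decidable (Pre_clause_map sentence) := by
  unfold Pre_clause_map; infer_instance

def pvWitness_clause_map : List String := ["(", "A", "|", "!", "B", ")"]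

def Spec_clause_map (sentence : List String) (out : List (String × Bool)) : Prop := out = clause_map_alt sentence
instance (sentence : List String) (out : List (String × Bool)) : Decidable (Spec_clause_map sentence out) := by unfold Spec_clause_map; infer_instance

-- ===== CLAIM (what is proved, stated in full; the proofs are below) =====
def Claim_equal_clause_map : Prop := ∀ (sentence : List String), Dom_clause_map sentence → Pre_clause_map sentence → Spec_clause_map sentence (clause_map sentence)

-- ===== LEMMAS AND PROOFS =====

lemma getD_at (s : List String) (j : Nat) (h : j < s.length) : s.getD j "" = s[j] := by
  rw [List.getD_eq_getElem?_getD, List.getElem?_eq_getElem h]; rfl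

-- proof-side reformulation of B's loop as structural recursion on the remaining tokens
def consume (tokens : List String) (m : PySem.Dict String Bool) : PySem.Dict String Bool :=
  match tokens with
  | [] => m
  | t :: rest =>
    if t = "!" then consume (rest.drop 2) (m.insert (rest.getD 0 "") true)
    else consume (rest.drop 1) (m.insert t false)
termination_by tokens.length
decreasing_by all_goals simp

lemma altGo_eq_consume (inner : List String) :
    ∀ n k m, inner.length - k ≤ n → altGo inner k m = consume (inner.drop k) m := by
  intro n
  induction n with
  | zero =>
    intro k m h
    have hk : ¬ k < inner.length := by omega
    have hnil : inner.drop k = [] := by apply List.drop_eq_nil_of_le; omega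
    rw [altGo, dif_neg hk, hnil, consume]
  | succ n ih =>
    intro k m h
    by_cases hk : k < inner.length
    · have hd : inner.drop k = inner.getD k "" :: inner.drop (k + 1) := by
        rw [List.drop_eq_getElem_cons hk, getD_at inner k hk]
      rw [altGo, dif_pos hk, hd]
      by_cases hb : inner.getD k "" = "!"
      · rw [if_pos hb, consume, if_pos hb]
        have h0 : (inner.drop (k + 1)).getD 0 "" = inner.getD (k + 1) "" := by
          rw [List.getD_eq_getElem?_getD, List.getD_eq_getElem?_getD, List.getElem?_drop]
        have h2 : (inner.drop (k + 1)).drop 2 = inner.drop (k + 3) := by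
          rw [List.drop_drop]
        rw [h0, h2]
        exact ih (k + 3) _ (by omega)
      · rw [if_neg hb, consume, if_neg hb]
        have h1 : (inner.drop (k + 1)).drop 1 = inner.drop (k + 2) := by
          rw [List.drop_drop]
        rw [h1]
        exact ih (k + 2) _ (by omega)
    · have hnil : inner.drop k = [] := by apply List.drop_eq_nil_of_le; omega
      rw [altGo, dif_neg hk, hnil, consume]

lemma altGo_zero (inner : List String) (m : PySem.Dict String Bool) :
    altGo inner 0 m = consume inner m := by
  have h := altGo_eq_consume inner inner.length 0 m (by omega)
  simpa using h

lemma take_drop_cons (s : List String) (L j : Nat) (h : j < L) (hL : L ≤ s.length) :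
    (s.take L).drop j = s.getD j "" :: (s.take L).drop (j + 1) := by
  have hj : j < (s.take L).length := by simp; omega
  rw [List.drop_eq_getElem_cons hj, List.getElem_take]
  congr 1
  rw [List.getD_eq_getElem?_getD, List.getElem?_eq_getElem (by omega)]
  rfl

lemma go_eq (s : List String) (L j0 : Nat) (hL : L ≤ s.length)
    (C1 : ∀ p, j0 ≤ p → p < L → s.getD p "" ≠ "(" ∧ s.getD p "" ≠ ")")
    (C2 : ∀ p, j0 ≤ p → p < L → s.getD p "" = "!" → p + 1 < L ∧ s.getD (p + 1) "" ≠ "!") :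
    ∀ fuel j m, j0 ≤ j → L - j ≤ fuel →
      clauseMapGo s L fuel j m = consume ((s.take L).drop j) m := by
  intro fuel
  induction fuel with
  | zero =>
    intro j m hj hfuel
    have hnil : (s.take L).drop j = [] := by
      apply List.drop_eq_nil_of_le; simp; omega
    simp [clauseMapGo, hnil, consume]
  | succ fuel ih =>
    intro j m hj hfuel
    by_cases hjL : j < L
    · have hd := take_drop_cons s L j hjL hL
      obtain ⟨hop, hcl⟩ := C1 j hj hjL
      by_cases hbang : s.getD j "" = "!"
      · obtain ⟨hlt, hnb⟩ := C2 j hj hjL hbang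
        obtain ⟨hop1, hcl1⟩ := C1 (j + 1) (by omega) hlt
        have hfs : forward_slice s j = some ([s.getD j "", s.getD (j + 1) ""], j + 1) := by
          have h1 : j < s.length := by omega
          have h2 : j + 1 < s.length := by omega
          rw [getD_at s j h1] at hbang
          rw [getD_at s (j + 1) h2] at hop1 hcl1 hnb
          clear hd
          have e1 : forwardSliceGo s j j 0 = forwardSliceGo s j (j + 1) 0 := by
            rw [forwardSliceGo]; simp [h1, hbang]
          have e2 : forwardSliceGo s j (j + 1) 0 =
              some ((s.take (j + 1 + 1)).drop j, j + 1) := by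
            rw [forwardSliceGo]; simp [h2, hop1, hcl1, hnb]
          unfold forward_slice
          rw [e1, e2]
          rw [take_drop_cons s (j + 1 + 1) j (by omega) (by omega),
              take_drop_cons s (j + 1 + 1) (j + 1) (by omega) (by omega)]
          simp
        have hd1 := take_drop_cons s L (j + 1) hlt hL
        rw [hd, hd1]
        simp only [clauseMapGo, consume, hfs, if_pos hjL, hbang,
          List.getD_cons_zero, List.getD_cons_succ, List.drop_drop, List.drop_succ_cons,
          reduceIte]
        have h3 : j + 1 + 2 = j + 3 := by omega
        have h3' : j + 1 + 1 + 1 = j + 3 := by omega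
        rw [h3, h3']
        exact ih (j + 3) (m.insert (s.getD (j + 1) "") true) (by omega) (by omega)
      · have hfs : forward_slice s j = some ([s.getD j ""], j) := by
          have h1 : j < s.length := by omega
          rw [getD_at s j h1] at hop hcl hbang
          unfold forward_slice
          rw [forwardSliceGo]
          simp [h1, hop, hcl, hbang]
          rw [take_drop_cons s (j + 1) j (by omega) (by omega)]
          simp [List.getD_eq_getElem?_getD, List.getElem?_eq_getElem h1]
        rw [hd]
        simp only [clauseMapGo, consume, hfs, if_pos hjL,
          List.getD_cons_zero, if_neg hbang]
        have h2 : List.drop 1 (List.drop (j + 1) (List.take L s)) = List.drop (j + 2) (List.take L s) := by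
          rw [List.drop_drop]
        rw [h2]
        exact ih (j + 2) (m.insert (s.getD j "") false) (by omega) (by omega)
    · have hnil : (s.take L).drop j = [] := by
        apply List.drop_eq_nil_of_le; simp; omega
      simp [clauseMapGo, hnil, consume, hjL]

lemma getD_take_drop (s : List String) (L a q : Nat) (hq : a + q < L) :
    ((s.take L).drop a).getD q "" = s.getD (a + q) "" := by
  rw [List.getD_eq_getElem?_getD, List.getD_eq_getElem?_getD, List.getElem?_drop,
      List.getElem?_take_of_lt hq]

lemma slice_one_negOne (s : List String) (h : s ≠ []) :
    PySem.List.slice s (some 1) (some (-1)) = (s.take (s.length - 1)).drop 1 := by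
  have hl : 0 < s.length := List.length_pos_iff.mpr h
  have hmin : min 1 s.length = 1 := by omega
  simp [PySem.List.slice, hmin, List.drop_take]

lemma len_take_drop (s : List String) (L a : Nat) (hL : L ≤ s.length) :
    ((s.take L).drop a).length = L - a := by
  simp; omega

-- ===== VERDICT (by name: the statement is the Claim_ definition above) =====
theorem clause_map_spec : Claim_equal_clause_map := by
  intro sentence _hdom hpre
  obtain ⟨hne, hp⟩ := hpre
  have hl : 0 < sentence.length := List.length_pos_iff.mpr hne
  unfold Spec_clause_map clause_map clause_map_alt
  simp only [altGo_zero]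
  by_cases hh : sentence.getD 0 "" = "("
  all_goals have hh0 := hh
  all_goals rw [List.getD_eq_getElem?_getD] at hh0
  · have hinner : pvInner sentence = (sentence.take (sentence.length - 1)).drop 1 := by
      unfold pvInner
      rw [if_pos hh]
      simp [List.dropLast_eq_take, List.drop_take]
    rw [hinner] at hp
    have hlen : ((sentence.take (sentence.length - 1)).drop 1).length
        = sentence.length - 1 - 1 := len_take_drop _ _ _ (by omega)
    simp only [hh, reduceIte, slice_one_negOne sentence hne]
    congr 1
    apply go_eq sentence (sentence.length - 1) 1 (by omega)
    · intro p h1p hpL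
      have := hp (p - 1) (by omega)
      rw [hlen, getD_take_drop _ _ _ _ (by omega)] at this
      have he : 1 + (p - 1) = p := by omega
      rw [he] at this
      exact ⟨this.1, this.2.1⟩
    · intro p h1p hpL hb
      have := hp (p - 1) (by omega)
      rw [hlen, getD_take_drop _ _ _ _ (by omega)] at this
      have he : 1 + (p - 1) = p := by omega
      rw [he] at this
      obtain ⟨hlt, hnb⟩ := this.2.2 hb
      rw [getD_take_drop _ _ _ _ (by omega)] at hnb
      have he2 : 1 + (p - 1 + 1) = p + 1 := by omega
      rw [he2] at hnb
      exact ⟨by omega, hnb⟩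
    · exact le_refl 1
    · omega
  · have hinner : pvInner sentence = sentence := by unfold pvInner; rw [if_neg hh]
    rw [hinner] at hp
    simp only [hh, reduceIte]
    have htake : (sentence.take sentence.length).drop 0 = sentence := by simp
    congr 1
    conv_rhs => rw [← htake]
    apply go_eq sentence sentence.length 0 (le_refl _)
    · intro p _ hpL
      have := hp p (by omega)
      exact ⟨this.1, this.2.1⟩
    · intro p _ hpL hb
      have := hp p (by omega)
      exact this.2.2 hb
    · exact Nat.zero_le 0
    · omega
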